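-- pv_equiv track=rewrite | github.com/yoni206/invertibility | scripts/analyze_results.py | get_red_configs
-- ===== SOURCE A (Python) =====
-- def get_red_configs(redundents, encodings, configurations):
--     result = []
--     for conf in configurations:
--         red = True
--         for enc in encodings:
--             if [enc, conf] not in redundents:
--                 red = False
--         if red:
--             result.append(conf)
--     return result
-- ===== SOURCE B (Python) =====
-- def get_red_configs(redundents, encodings, configurations):
--     index = {}
--     for pair in redundents:
--         if len(pair) == 2:
--             enc, conf = pair
--             index.setdefault(conf, set()).add(enc)
--     needed = set(encodings)
--     return [conf for conf in configurations if needed <= index.get(conf, set())]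
-- ===== Notes on version B (the rewrite author's own statement) =====
-- stated objective: faster
-- what changed: B builds a dict mapping each conf to the set of encodings marked redundant for it in one pass over redundents, then keeps the configurations whose encoding set is a subset of that group, instead of A's membership scan of redundents for every (enc, conf) pair.
import Mathlib
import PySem

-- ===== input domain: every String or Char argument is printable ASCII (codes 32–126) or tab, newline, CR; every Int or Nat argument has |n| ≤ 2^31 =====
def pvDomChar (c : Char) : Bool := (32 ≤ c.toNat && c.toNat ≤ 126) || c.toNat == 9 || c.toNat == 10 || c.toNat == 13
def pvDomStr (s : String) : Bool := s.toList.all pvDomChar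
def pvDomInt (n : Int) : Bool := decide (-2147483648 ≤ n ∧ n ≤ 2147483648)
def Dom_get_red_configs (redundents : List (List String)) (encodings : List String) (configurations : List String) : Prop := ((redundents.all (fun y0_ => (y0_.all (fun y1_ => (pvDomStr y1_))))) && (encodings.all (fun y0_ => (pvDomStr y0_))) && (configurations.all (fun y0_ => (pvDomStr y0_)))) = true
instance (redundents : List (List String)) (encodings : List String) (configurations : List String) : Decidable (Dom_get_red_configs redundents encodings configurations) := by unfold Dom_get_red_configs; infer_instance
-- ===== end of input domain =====

-- B replaces A's per-config rescans of `redundents` with one grouping pass (conf → set of encs) and a subset test; same return value.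

-- ===== PORT A =====
def get_red_configs (redundents : List (List String)) (encodings : List String) (configurations : List String) : List String :=
  configurations.foldl (fun result conf =>
    let red := encodings.foldl (fun red enc =>
      if [enc, conf] ∈ redundents then red else false) true
    if red then result ++ [conf] else result) []

-- ===== PORT B =====
-- grouping pass of Source B: for pair in redundents: if len(pair)==2: enc, conf = pair; index.setdefault(conf, set()).add(enc)
def pvIndex (redundents : List (List String)) : PySem.Dict String (PySem.Set String) :=
  redundents.foldl (fun index pair =>
    match pair with
    | [enc, conf] => index.modify conf PySem.Set.empty (fun s => PySem.Set.add s enc)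
    | _ => index) PySem.Dict.empty

def get_red_configs_alt (redundents : List (List String)) (encodings : List String) (configurations : List String) : List String :=
  let index := pvIndex redundents
  let needed := PySem.Set.ofList encodings
  configurations.filter (fun conf => PySem.Set.issubset needed (index.getD conf PySem.Set.empty))

-- ===== PRECONDITION & SPEC =====
def Spec_get_red_configs (redundents : List (List String)) (encodings : List String) (configurations : List String) (out : List String) : Prop := out = get_red_configs_alt redundents encodings configurations
instance (redundents : List (List String)) (encodings : List String) (configurations : List String) (out : List String) : Decidable (Spec_get_red_configs redundents encodings configurations out) := by unfold Spec_get_red_configs; infer_instance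

-- ===== CLAIM (what is proved, stated in full; the proofs are below) =====
def Claim_equal_get_red_configs : Prop := ∀ (redundents : List (List String)) (encodings : List String) (configurations : List String), Dom_get_red_configs redundents encodings configurations → Spec_get_red_configs redundents encodings configurations (get_red_configs redundents encodings configurations)

-- ===== LEMMAS AND PROOFS =====

-- the grouped index answers exactly membership of [e, c] in redundents
lemma pv_mem_index (rs : List (List String)) (d : PySem.Dict String (PySem.Set String)) (c e : String) :
    e ∈ (rs.foldl (fun index pair =>
        match pair with
        | [enc, conf] => index.modify conf PySem.Set.empty (fun s => PySem.Set.add s enc)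
        | _ => index) d).getD c PySem.Set.empty
      ↔ e ∈ d.getD c PySem.Set.empty ∨ [e, c] ∈ rs := by
  induction rs generalizing d with
  | nil => simp
  | cons p rest ih =>
    rw [List.foldl_cons]
    match p with
    | [] => refine (ih _).trans ?_; simp
    | [x] => refine (ih _).trans ?_; simp
    | [enc, conf] =>
      refine (ih _).trans ?_
      rw [PySem.Dict.getD_modify]
      by_cases hc : c = conf
      · subst hc
        rw [if_pos rfl]
        simp only [PySem.Set.mem_add, List.mem_cons, List.cons.injEq, and_true]
        tauto
      · simp only [if_neg hc, List.mem_cons, List.cons.injEq, and_true]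
        constructor
        · tauto
        · rintro (h | (⟨rfl, rfl⟩ | h))
          · exact Or.inl h
          · exact absurd rfl hc
          · exact Or.inr h
    | x :: y :: z :: t => refine (ih _).trans ?_; simp

-- A's inner flag loop is the 'all' of the membership tests
lemma pv_inner_fold (rs : List (List String)) (c : String) (es : List String) (b : Bool) :
    es.foldl (fun red enc => if [enc, c] ∈ rs then red else false) b
      = (b && es.all (fun enc => decide ([enc, c] ∈ rs))) := by
  induction es generalizing b with
  | nil => simp
  | cons e t ih =>
    simp only [List.foldl_cons, List.all_cons, ih]
    by_cases h : [e, c] ∈ rs <;> simp [h]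

-- the two per-config tests agree
lemma pv_test_eq (rs : List (List String)) (es : List String) (c : String) :
    (es.foldl (fun red enc => if [enc, c] ∈ rs then red else false) true)
      = PySem.Set.issubset (PySem.Set.ofList es) ((pvIndex rs).getD c PySem.Set.empty) := by
  rw [pv_inner_fold]
  rcases h : PySem.Set.issubset (PySem.Set.ofList es) ((pvIndex rs).getD c PySem.Set.empty) with _ | _
  · simp only [Bool.true_and]
    rw [Bool.eq_false_iff]
    intro hall
    rw [Bool.eq_false_iff] at h
    apply h
    rw [PySem.Set.issubset_iff]
    intro x hx
    rw [PySem.Set.mem_ofList] at hx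
    rw [pvIndex, pv_mem_index]
    exact Or.inr (by simpa using (List.all_eq_true.mp hall x hx))
  · rw [PySem.Set.issubset_iff] at h
    simp only [Bool.true_and, List.all_eq_true, decide_eq_true_eq]
    intro x hx
    have := h x (by rw [PySem.Set.mem_ofList]; exact hx)
    rw [pvIndex, pv_mem_index] at this
    rcases this with h' | h'
    · simp [PySem.Dict.empty, PySem.Dict.getD, PySem.Dict.get?] at h'
    · exact h'

lemma pv_main (rs : List (List String)) (es : List String) (cs : List String) (acc : List String) :
    cs.foldl (fun result conf =>
        let red := es.foldl (fun red enc => if [enc, conf] ∈ rs then red else false) true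
        if red then result ++ [conf] else result) acc
      = acc ++ cs.filter (fun conf => PySem.Set.issubset (PySem.Set.ofList es) ((pvIndex rs).getD conf PySem.Set.empty)) := by
  induction cs generalizing acc with
  | nil => simp
  | cons c t ih =>
    simp only [List.foldl_cons, List.filter_cons]
    rw [← pv_test_eq rs es c]
    by_cases h : (es.foldl (fun red enc => if [enc, c] ∈ rs then red else false) true) = true
    · rw [if_pos h, if_pos h, ih]
      simp
    · rw [if_neg h, if_neg h, ih]

-- ===== VERDICT (by name: the statement is the Claim_ definition above) =====
theorem get_red_configs_spec : Claim_equal_get_red_configs := by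
  intro rs es cs _
  show _ = _
  unfold get_red_configs get_red_configs_alt
  simpa using pv_main rs es cs []
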